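-- pv_equiv track=rewrite | github.com/yuda110/algorithm_solutions | TryHelloWorld/level5_change124.py | change124
-- ===== SOURCE A (Python) =====
-- from itertools import product
--
-- def change124(n):
--     count = 1
--     digit = 1
--     while count != n :
--         for i in product('124', repeat=digit):
--             cur_num = ''.join(i)
--             if count == n :
--                 break
--             count += 1
--         digit += 1
--     return cur_num
-- ===== SOURCE B (Python) =====
-- def change124(n):
--     res = ''
--     while n > 0:
--         r = n % 3
--         if r == 0:
--             n = n // 3 - 1
--             res = '4' + res
--         else:
--             n = n // 3
--             res = str(r) + res
--     return res
-- ===== Notes on version B (the rewrite author's own statement) =====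
-- stated objective: faster
-- what changed: A enumerates every '124' string in order counting up to n (O(n) work); B computes the n-th string directly by bijective base-3 conversion, mapping remainders 1,2,0 to digits '1','2','4' (O(log n)).
-- intended difference: On block boundaries n=(3^k-1)/2 (k>=2: n=4,13,40,...) A returns the last (k-1)-digit string '44...4' because count passes n between the inner break test and the outer while test, while B returns the intended k-digit answer '11...1' (e.g. change124(4): A '4', B '11'). — e.g. on change124(4): A returns "4", B returns "11"
-- outside the precondition, e.g. on change124(1): A raises UnboundLocalError, B returns '1'; on change124(0): A does not finish within the time limit, B returns ''
import Mathlib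
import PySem

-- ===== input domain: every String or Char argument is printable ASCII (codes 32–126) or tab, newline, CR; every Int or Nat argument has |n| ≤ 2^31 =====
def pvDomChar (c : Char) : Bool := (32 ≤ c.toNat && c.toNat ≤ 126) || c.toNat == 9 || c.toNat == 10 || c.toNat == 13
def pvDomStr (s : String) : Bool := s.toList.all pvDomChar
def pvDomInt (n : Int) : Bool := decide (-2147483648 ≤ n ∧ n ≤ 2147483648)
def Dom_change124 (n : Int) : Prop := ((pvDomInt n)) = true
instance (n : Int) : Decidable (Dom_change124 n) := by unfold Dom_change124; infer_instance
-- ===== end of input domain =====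

-- B replaces A's O(n) enumeration of all '124' strings by direct bijective base-3 conversion (O(log n); a timing run measured it faster).


-- ===== PORT A =====
-- itertools.product('124', repeat=d), transliterated from the documented equivalent
-- 'result = [x+[y] for x in result for y in pool]'; strings as List Char, joined by String.mk.
def prodList : Nat → List (List Char)
  | 0 => [[]]
  | d+1 => (prodList d).flatMap (fun x => ['1', '2', '4'].map (fun y => x ++ [y]))

-- the inner 'for i in product(...)': cur_num = ''.join(i); if count == n: break; count += 1
def innerFor (n : Int) : List (List Char) → Int → Option String → Int × Option String
  | [], count, cur => (count, cur)
  | i :: rest, count, _cur =>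
      if count = n then (count, some (String.mk i))
      else innerFor n rest (count + 1) (some (String.mk i))

-- the outer 'while count != n', with fuel counting outer passes
def outerWhile (n : Int) : Nat → Int → Nat → Option String → Option String
  | 0, _, _, cur => cur
  | fuel+1, count, digit, cur =>
      if count = n then cur
      else
        let p := innerFor n (prodList digit) count cur
        outerWhile n fuel p.1 (digit+1) p.2

-- Fuel n.toNat+1 bounds the number of outer passes: for 2 ≤ n the loop breaks within the
-- first n passes (proved below); for n ≤ 0 the Python loop diverges (outside Pre_).
-- 'none' at the end is Python's unbound cur_num (UnboundLocalError, only n = 1; outside Pre_).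
def change124 (n : Int) : String :=
  match outerWhile n (n.toNat + 1) 1 1 none with
  | some s => s
  | none => ""

-- ===== PORT B =====
-- Source B's while loop; res kept as List Char (res = ch + res ↦ ch :: res), String.mk at return.
-- str(r) with r ∈ {1,2} is exactly the one-character string, ported as the if below.
def altGo (n : Int) (res : List Char) : List Char :=
  if h : 0 < n then
    if PySem.Int.mod n 3 = 0 then
      altGo (PySem.Int.floordiv n 3 - 1) ('4' :: res)
    else
      altGo (PySem.Int.floordiv n 3) ((if PySem.Int.mod n 3 = 1 then '1' else '2') :: res)
  else res
termination_by n.toNat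
decreasing_by
  · rw [PySem.Int.floordiv_eq_ediv_of_pos (by norm_num)]; omega
  · rw [PySem.Int.floordiv_eq_ediv_of_pos (by norm_num)]; omega

def change124_alt (n : Int) : String := String.mk (altGo n [])

-- ===== PRECONDITION & SPEC =====
-- Pre_ excludes n ≤ 1: at n = 1 the Python A raises UnboundLocalError, and for n ≤ 0 its
-- while loop never terminates (count only grows away from n).
def Pre_change124 (n : Int) : Prop := 2 ≤ n
instance (n : Int) : Decidable (Pre_change124 n) := by unfold Pre_change124; infer_instance
def pvWitness_change124 : Int := (7)

-- On block boundaries n = (3^k-1)/2 (k ≥ 2: n = 4, 13, 40, …) A returns the last (k-1)-digit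
-- string '44…4' because count passes n between the inner break test and the outer while test,
-- while B returns the intended k-digit numeral '11…1'.
def D_change124 (n : Int) : Prop := 4 ≤ n ∧ ∃ k, k < 21 ∧ 2 * n + 1 = 3 ^ k
instance (n : Int) : Decidable (D_change124 n) := by unfold D_change124; infer_instance

def Spec_change124 (n : Int) (out : String) : Prop := ¬ D_change124 n → out = change124_alt n
instance (n : Int) (out : String) : Decidable (Spec_change124 n out) := by unfold Spec_change124; infer_instance

def pvDiffWitness_change124 : Int := (4)
def pvDiffWitnessOut_change124 : String × String := ("4", "11")

-- ===== CLAIM (what is proved, stated in full; the proofs are below) =====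
def Claim_unchanged_change124 : Prop := ∀ (n : Int), Dom_change124 n → Pre_change124 n → Spec_change124 n (change124 n)
def Claim_changed_change124 : Prop := Dom_change124 (pvDiffWitness_change124) ∧ Pre_change124 (pvDiffWitness_change124) ∧ D_change124 (pvDiffWitness_change124) ∧ change124 (pvDiffWitness_change124) = pvDiffWitnessOut_change124.1 ∧ change124_alt (pvDiffWitness_change124) = pvDiffWitnessOut_change124.2 ∧ pvDiffWitnessOut_change124.1 ≠ pvDiffWitnessOut_change124.2
def Claim_exact_change124 : Prop := ∀ (n : Int), Dom_change124 n → Pre_change124 n → D_change124 n → change124 n ≠ change124_alt n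

-- ===== LEMMAS AND PROOFS =====

-- S d = number of '124' strings of length < d, plus 1 (the value of count entering pass d)
def S : Nat → Nat
  | 0 => 0
  | d+1 => 3 * S d + 1

def dchar (r : Nat) : Char := if r = 0 then '1' else if r = 1 then '2' else '4'

-- the j-th (0-based) length-d string over '124' in product order
def pad : Nat → Nat → List Char
  | 0, _ => []
  | d+1, j => pad d (j / 3) ++ [dchar (j % 3)]

-- reference bijective-base-3 numeral (Nat version of B's loop)
def g (n : Nat) : List Char :=
  if h : n = 0 then []
  else if n % 3 = 0 then g (n / 3 - 1) ++ ['4']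
  else g (n / 3) ++ [dchar (n % 3 - 1)]
termination_by n
decreasing_by all_goals omega

theorem twoS (d : Nat) : 2 * S d + 1 = 3 ^ d := by
  induction d with
  | zero => simp [S]
  | succ d ih => simp [S, pow_succ]; omega

theorem S_succ (d : Nat) : S (d+1) = S d + 3 ^ d := by
  have := twoS d; simp [S]; omega

theorem S_lt_S {a b : Nat} (h : a < b) : S a < S b := by
  induction b with
  | zero => omega
  | succ b ih =>
    rcases Nat.lt_succ_iff_lt_or_eq.mp h with h' | h'
    · have := ih h'; simp [S]; omega
    · subst h'; simp [S]; omega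

theorem le_S (d : Nat) : d ≤ S d := by
  induction d with
  | zero => simp [S]
  | succ d ih => simp [S]; omega

theorem pad_length (d : Nat) : ∀ j, (pad d j).length = d := by
  induction d with
  | zero => intro j; simp [pad]
  | succ d ih => intro j; simp [pad, ih]

theorem altGo_eq_g : ∀ (m : Nat) (res : List Char), altGo (m : Int) res = g m ++ res := by
  intro m
  induction m using Nat.strong_induction_on with
  | _ m ih =>
    intro res
    by_cases h0 : m = 0
    · subst h0; rw [altGo, g]; simp
    · rw [altGo, g]
      have hm3 : PySem.Int.mod (m : Int) 3 = ((m % 3 : Nat) : Int) := by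
        exact_mod_cast PySem.Int.mod_natCast m 3
      have hd3 : PySem.Int.floordiv (m : Int) 3 = ((m / 3 : Nat) : Int) := by
        exact_mod_cast PySem.Int.floordiv_natCast m 3
      rw [dif_pos (by exact_mod_cast Nat.pos_of_ne_zero h0), dif_neg h0, hm3, hd3]
      by_cases hr : m % 3 = 0
      · have hq : 1 ≤ m / 3 := by omega
        have : ((m / 3 : Nat) : Int) - 1 = ((m / 3 - 1 : Nat) : Int) := by omega
        rw [if_pos (by exact_mod_cast hr), if_pos hr, this,
            ih (m / 3 - 1) (by omega) ('4' :: res)]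
        simp
      · have hr' : m % 3 = 1 ∨ m % 3 = 2 := by omega
        rw [if_neg (by exact_mod_cast hr), if_neg hr, ih (m / 3) (by omega)]
        rcases hr' with h | h <;> simp [h, dchar]
  
theorem g_pad : ∀ (d j : Nat), j < 3 ^ d → g (S d + j) = pad d j := by
  intro d
  induction d with
  | zero => intro j hj; interval_cases j; simp [S, pad, g]
  | succ d ih =>
    intro j hj
    have h3 : (3:Nat) ^ (d+1) = 3 * 3 ^ d := by ring
    set q := j / 3 with hq
    set r := j % 3 with hr
    have hj3 : j = 3 * q + r ∧ r < 3 := by constructor <;> omega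
    have hqlt : q < 3 ^ d := by omega
    have hSn : S (d+1) + j = 3 * (S d + q) + (r + 1) := by simp [S]; omega
    rw [hSn]
    have hpos : 3 * (S d + q) + (r + 1) ≠ 0 := by omega
    by_cases h2 : r = 2
    · have hmod : (3 * (S d + q) + (r + 1)) % 3 = 0 := by omega
      have hdiv : (3 * (S d + q) + (r + 1)) / 3 - 1 = S d + q := by omega
      rw [g, dif_neg hpos, if_pos hmod, hdiv, ih q hqlt]
      simp [pad, ← hq, ← hr, h2, dchar]
    · have hmod : (3 * (S d + q) + (r + 1)) % 3 = r + 1 := by omega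
      have hdiv : (3 * (S d + q) + (r + 1)) / 3 = S d + q := by omega
      rw [g, dif_neg hpos, if_neg (by omega), hdiv, ih q hqlt, hmod]
      simp [pad, ← hq, ← hr, dchar]

theorem range_three_mul (m : Nat) : List.range (3 * m) = (List.range m).flatMap (fun q => [3*q, 3*q+1, 3*q+2]) := by
  induction m with
  | zero => simp
  | succ m ih =>
    have : 3 * (m + 1) = 3 * m + 3 := by ring
    rw [this, List.range_add, ih]
    conv_rhs => rw [List.range_succ]
    rw [List.flatMap_append]
    simp [List.range_succ]

theorem prodList_eq (d : Nat) : prodList d = (List.range (3 ^ d)).map (pad d) := by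
  induction d with
  | zero => simp [prodList, pad]
  | succ d ih =>
    have h3 : (3:Nat) ^ (d+1) = 3 * 3 ^ d := by ring
    rw [prodList, ih, h3, range_three_mul, List.flatMap_map, List.map_flatMap]
    apply List.flatMap_congr
    intro q _
    have e0 : (3*q) / 3 = q ∧ (3*q) % 3 = 0 := by omega
    have e1 : (3*q+1) / 3 = q ∧ (3*q+1) % 3 = 1 := by omega
    have e2 : (3*q+2) / 3 = q ∧ (3*q+2) % 3 = 2 := by omega
    simp [pad, e0.1, e0.2, e1.1, e1.2, e2.1, e2.2, dchar]

theorem inner_break (n : Int) : ∀ (ws : List (List Char)) (c : Int) (cur : Option String)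
    (h1 : c ≤ n) (h2 : (n - c).toNat < ws.length),
    innerFor n ws c cur = (n, some (String.mk (ws[(n - c).toNat]'h2))) := by
  intro ws
  induction ws with
  | nil => intro c cur h1 h2; simp at h2
  | cons w rest ih =>
    intro c cur h1 h2
    by_cases hc : c = n
    · subst hc
      simp [innerFor]
    · have hlt : c < n := lt_of_le_of_ne h1 hc
      have hidx : (n - c).toNat = (n - (c+1)).toNat + 1 := by omega
      have h2' : (n - (c+1)).toNat < rest.length := by
        simp only [List.length_cons] at h2; omega
      rw [innerFor, if_neg hc, ih (c+1) (some (String.mk w)) (by omega) h2']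
      simp only [hidx, List.getElem_cons_succ]

theorem inner_nobreak (n : Int) : ∀ (ws : List (List Char)) (c : Int) (cur : Option String)
    (h : ∀ j : Nat, j < ws.length → c + j ≠ n),
    innerFor n ws c cur = (c + ws.length, ws.foldl (fun _ i => some (String.mk i)) cur) := by
  intro ws
  induction ws with
  | nil => intro c cur h; simp [innerFor]
  | cons w rest ih =>
    intro c cur h
    have hc : c ≠ n := by have := h 0 (by simp); simpa using this
    rw [innerFor, if_neg hc, ih (c+1) _ (by intro j hj; have := h (j+1) (by simp; omega); push_cast at this ⊢; omega)]
    simp only [List.length_cons, List.foldl_cons]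
    congr 1
    push_cast; ring

theorem outer_at_n (n : Int) : ∀ (fuel : Nat) (d : Nat) (cur : Option String),
    outerWhile n fuel n d cur = cur := by
  intro fuel d cur
  cases fuel with
  | zero => rfl
  | succ f => simp [outerWhile]

theorem foldl_last (f : Nat → List Char) (k : Nat) : ∀ (cur : Option String),
    ((List.range (k+1)).map f).foldl (fun _ i => some (String.mk i)) cur = some (String.mk (f k)) := by
  intro cur
  rw [List.range_succ, List.map_append, List.foldl_append]
  simp

theorem foldl_pad (d : Nat) (cur : Option String) :
    (prodList d).foldl (fun _ i => some (String.mk i)) cur = some (String.mk (pad d (3 ^ d - 1))) := by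
  have h0 : 0 < (3:Nat) ^ d := by positivity
  rw [prodList_eq, show (3:Nat) ^ d = (3 ^ d - 1) + 1 by omega, foldl_last]
  simp

-- the no-boundary run of the outer loop
theorem outer_nb (n' : Nat) (hnb : ∀ e, n' ≠ S e) :
    ∀ (fuel d : Nat) (cur : Option String), 1 ≤ d → S d < n' → n' < S (d + fuel) →
    outerWhile (n' : Int) fuel ((S d : Nat) : Int) d cur = some (String.mk (g n')) := by
  intro fuel
  induction fuel with
  | zero => intro d cur _ h1 h2; simp at h2; omega
  | succ f ih =>
    intro d cur hd h1 h2
    have hne : ((S d : Nat) : Int) ≠ (n' : Int) := by exact_mod_cast (by omega : S d ≠ n')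
    rw [outerWhile, if_neg hne]
    by_cases hcase : n' < S (d+1)
    · -- break happens in this pass
      have hlen : (prodList d).length = 3 ^ d := by rw [prodList_eq]; simp
      have hidx : ((n' : Int) - (S d : Nat)).toNat < (prodList d).length := by
        rw [hlen]; have := S_succ d; omega
      rw [inner_break (n' : Int) (prodList d) _ cur (by exact_mod_cast le_of_lt h1) hidx]
      have hj : ((n' : Int) - ((S d : Nat) : Int)).toNat = n' - S d := by omega
      have hget : (prodList d)[((n' : Int) - ((S d : Nat) : Int)).toNat]'hidx = pad d (n' - S d) := by
        simp only [prodList_eq]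
        rw [List.getElem_map]
        congr 1
        · rw [List.getElem_range]; omega
      rw [hget]
      have hg : g n' = pad d (n' - S d) := by
        have := g_pad d (n' - S d) (by have := S_succ d; omega)
        rw [← this]; congr 1; omega
      simp only [← hg]
      exact outer_at_n (n' : Int) f (d+1) _
    · -- full pass, no break
      have hge : S (d+1) < n' := by
        rcases Nat.lt_or_ge n' (S (d+1) + 1) with h | h
        · exact absurd (by omega : n' = S (d+1)) (hnb (d+1))
        · omega
      have hnob : ∀ j : Nat, j < (prodList d).length → ((S d : Nat) : Int) + j ≠ (n' : Int) := by
        intro j hj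
        rw [prodList_eq] at hj; simp at hj
        have := S_succ d
        intro hEq
        have : S d + j = n' := by exact_mod_cast hEq
        omega
      rw [inner_nobreak (n' : Int) (prodList d) _ cur hnob]
      have hlen : (prodList d).length = 3 ^ d := by rw [prodList_eq]; simp
      have hcount : ((S d : Nat) : Int) + ((prodList d).length : Int) = ((S (d+1) : Nat) : Int) := by
        rw [hlen, S_succ]; push_cast; ring
      rw [foldl_pad, hcount]
      exact ih (d+1) _ (by omega) hge (by rw [show d + 1 + f = d + (f+1) from by omega]; exact h2)

-- the boundary run: n' = S (E+1), E ≥ 1; the loop exits returning the last length-E string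
theorem outer_bd (n' : Nat) (E : Nat) (hE : 1 ≤ E) (hn : n' = S (E+1)) :
    ∀ (fuel d : Nat) (cur : Option String), 1 ≤ d → S d < n' → n' < S (d + fuel) →
    outerWhile (n' : Int) fuel ((S d : Nat) : Int) d cur = some (String.mk (pad E (3 ^ E - 1))) := by
  intro fuel
  induction fuel with
  | zero => intro d cur _ h1 h2; simp at h2; omega
  | succ f ih =>
    intro d cur hd h1 h2
    have hne : ((S d : Nat) : Int) ≠ (n' : Int) := by exact_mod_cast (by omega : S d ≠ n')
    rw [outerWhile, if_neg hne]
    have hdE : d ≤ E := by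
      by_contra hcon
      have hle' : S (E+1) ≤ S d := by
        rcases Nat.eq_or_lt_of_le (show E + 1 ≤ d by omega) with h | h
        · rw [h]
        · exact le_of_lt (S_lt_S h)
      omega
    have hnob : ∀ j : Nat, j < (prodList d).length → ((S d : Nat) : Int) + j ≠ (n' : Int) := by
      intro j hj
      rw [prodList_eq] at hj; simp at hj
      have hs := S_succ d
      have hle : S (d+1) ≤ n' := by
        rw [hn]
        rcases Nat.eq_or_lt_of_le (show d + 1 ≤ E + 1 by omega) with h' | h'
        · rw [h']
        · exact le_of_lt (S_lt_S h')
      intro hEq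
      have : S d + j = n' := by exact_mod_cast hEq
      omega
    rw [inner_nobreak (n' : Int) (prodList d) _ cur hnob]
    have hlen : (prodList d).length = 3 ^ d := by rw [prodList_eq]; simp
    have hcount : ((S d : Nat) : Int) + ((prodList d).length : Int) = ((S (d+1) : Nat) : Int) := by
      rw [hlen, S_succ]; push_cast; ring
    rw [foldl_pad, hcount]
    by_cases hdE' : d = E
    · subst hdE'
      rw [← hn]
      exact outer_at_n (n' : Int) f (d+1) _
    · have hlt : S (d+1) < n' := by
        rw [hn]; exact S_lt_S (by omega)
      exact ih (d+1) _ (by omega) hlt (by rw [show d + 1 + f = d + (f+1) from by omega]; exact h2)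

theorem fuel_enough (n' : Nat) (h : 2 ≤ n') : n' < S (1 + (n' + 1)) := by
  have := le_S (1 + (n' + 1)); omega

theorem changeA_nb (n' : Nat) (h2 : 2 ≤ n') (hnb : ∀ e, n' ≠ S e) :
    change124 (n' : Int) = String.mk (g n') := by
  have hS1 : S 1 = 1 := by simp [S]
  have h := outer_nb n' hnb (n' + 1) 1 none (by omega) (by omega) (fuel_enough n' h2)
  rw [change124]
  have ht : ((n' : Int)).toNat = n' := by omega
  rw [ht]
  rw [show ((1:Int)) = ((S 1 : Nat) : Int) by rw [hS1]; norm_num] at *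
  rw [h]

theorem changeA_bd (n' : Nat) (h2 : 2 ≤ n') (E : Nat) (hE : 1 ≤ E) (hn : n' = S (E+1)) :
    change124 (n' : Int) = String.mk (pad E (3 ^ E - 1)) := by
  have hS1 : S 1 = 1 := by simp [S]
  have h := outer_bd n' E hE hn (n' + 1) 1 none (by omega) (by omega) (fuel_enough n' h2)
  rw [change124]
  have ht : ((n' : Int)).toNat = n' := by omega
  rw [ht]
  rw [show ((1:Int)) = ((S 1 : Nat) : Int) by rw [hS1]; norm_num] at *
  rw [h]

theorem changeB (n' : Nat) : change124_alt (n' : Int) = String.mk (g n') := by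
  rw [change124_alt, altGo_eq_g]; simp

-- D_ ↔ boundary, inside Dom and Pre
theorem D_iff_boundary (n : Int) (hdom : Dom_change124 n) (hpre : Pre_change124 n) :
    D_change124 n ↔ ∃ e, 1 ≤ e ∧ n.toNat = S (e+1) := by
  unfold Dom_change124 pvDomInt at hdom
  unfold Pre_change124 at hpre
  simp only [decide_eq_true_eq] at hdom
  constructor
  · rintro ⟨h4, k, hk21, hpow⟩
    have hk2 : 2 ≤ k := by
      by_contra h
      interval_cases k <;> norm_num at hpow <;> omega
    have e1 : 2 * ((S k : Nat) : Int) + 1 = 3 ^ k := by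
      have := congrArg (fun m : Nat => (m : Int)) (twoS k)
      push_cast at this
      exact this
    refine ⟨k - 1, by omega, ?_⟩
    rw [show k - 1 + 1 = k from by omega]
    omega
  · rintro ⟨e, he, hn⟩
    have e1 : 2 * ((S (e+1) : Nat) : Int) + 1 = 3 ^ (e+1) := by
      have := congrArg (fun m : Nat => (m : Int)) (twoS (e+1))
      push_cast at this
      exact this
    constructor
    · have hS2 : S 2 = 4 := by simp [S]
      have : S 2 ≤ S (e+1) := by
        rcases Nat.eq_or_lt_of_le (show 2 ≤ e + 1 by omega) with h | h
        · omega
        · exact le_of_lt (S_lt_S h)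
      omega
    · refine ⟨e + 1, ?_, by omega⟩
      by_contra hcon
      have h21 : 21 ≤ e + 1 := by omega
      have hmono : (3:Nat) ^ 21 ≤ 3 ^ (e+1) := Nat.pow_le_pow_right (by norm_num) h21
      have hb : (3:Nat) ^ 21 = 10460353203 := by norm_num
      have e2 : ((3 ^ (e+1) : Nat) : Int) = 3 ^ (e+1) := by push_cast; ring
      omega

theorem strMk_length_ne {l1 l2 : List Char} (h : l1.length ≠ l2.length) :
    String.mk l1 ≠ String.mk l2 := by
  intro hEq
  apply h
  have h2 : l1 = l2 := by
    have t1 : (String.mk l1).toList = l1 := Eq.symm (String.ofList_eq.mp rfl)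
    have t2 : (String.mk l2).toList = l2 := Eq.symm (String.ofList_eq.mp rfl)
    rw [← t1, ← t2, hEq]
  rw [h2]

-- ===== VERDICT (by name: the statement is the Claim_ definition above) =====
theorem change124_spec : Claim_unchanged_change124 := by
  intro n hdom hpre hnd
  have h2 : 2 ≤ n := hpre
  have hnn : n = ((n.toNat : Nat) : Int) := by omega
  have hnb : ∀ e, n.toNat ≠ S e := by
    intro e hEq
    apply hnd
    rw [D_iff_boundary n hdom hpre]
    have he2 : 2 ≤ e := by
      by_contra h
      interval_cases e <;> simp [S] at hEq <;> omega
    exact ⟨e - 1, by omega, by rw [show e - 1 + 1 = e by omega]; exact hEq⟩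
  rw [hnn, changeA_nb n.toNat (by omega) hnb, changeB]

theorem g_four : g 4 = ['1', '1'] := by
  rw [g]; norm_num
  rw [g]; norm_num
  rw [g]
  simp [dchar]

theorem change124_changed : Claim_changed_change124 := by
  unfold Claim_changed_change124
  refine ⟨by decide, by decide, by decide, by decide, ?_, by decide⟩
  show change124_alt 4 = "11"
  rw [show (4:Int) = ((4:Nat):Int) from by norm_num, changeB, g_four]
  rfl

theorem change124_tight : Claim_exact_change124 := by
  intro n hdom hpre hd
  obtain ⟨e, he, hn⟩ := (D_iff_boundary n hdom hpre).mp hd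
  have hnn : n = ((n.toNat : Nat) : Int) := by have : 2 ≤ n := hpre; omega
  rw [hnn, changeA_bd n.toNat (by have : 2 ≤ n := hpre; omega) e he hn, changeB]
  apply strMk_length_ne
  have hg : g (S (e+1)) = pad (e+1) 0 := by
    have := g_pad (e+1) 0 (by positivity)
    simpa using this
  rw [pad_length, hn, hg, pad_length]
  omega
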